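-- pv_equiv track=rewrite | github.com/ysyyds1688-maker/tg-scraper-toolkit | _archive/merge_dedup.py | merge_and_dedup
-- ===== SOURCE A (Python) =====
-- def merge_and_dedup(all_members):
--     """依 user_id 去重，合併來源群組"""
--     unique = {}
--     for m in all_members:
--         uid = m.get("user_id", "")
--         if not uid or uid == "":
--             continue
--         if uid in unique:
--             # 合併來源群組
--             existing_sources = unique[uid].get("source_group", "")
--             new_source = m.get("source_group", "")
--             if new_source and new_source not in existing_sources:
--                 unique[uid]["source_group"] = f"{existing_sources}; {new_source}" if existing_sources else new_source
--         else:
--             unique[uid] = dict(m)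
--     return list(unique.values())
-- ===== SOURCE B (Python) =====
-- def merge_and_dedup(all_members):
--     """依 user_id 去重，合併來源群組 — group by user_id first, then reduce each group's sources."""
--     groups = {}
--     for m in all_members:
--         uid = m.get("user_id", "")
--         if uid:
--             groups.setdefault(uid, []).append(m)
--     result = []
--     for ms in groups.values():
--         first = ms[0]
--         src = first.get("source_group", "")
--         for m in ms[1:]:
--             s = m.get("source_group", "")
--             if s and s not in src:
--                 src = f"{src}; {s}" if src else s
--         merged = dict(first)
--         if src:
--             merged["source_group"] = src
--         result.append(merged)
--     return result
-- ===== Notes on version B (the rewrite author's own statement) =====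
-- stated objective: alternative
-- what changed: B separates the work into two passes: it first groups members by user_id into an ordered dict of lists, then reduces each group by folding the source_group strings into an accumulator and writing it once into a copy of the group's first member, instead of A's single loop that merges incrementally into the stored dict.
import Mathlib
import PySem

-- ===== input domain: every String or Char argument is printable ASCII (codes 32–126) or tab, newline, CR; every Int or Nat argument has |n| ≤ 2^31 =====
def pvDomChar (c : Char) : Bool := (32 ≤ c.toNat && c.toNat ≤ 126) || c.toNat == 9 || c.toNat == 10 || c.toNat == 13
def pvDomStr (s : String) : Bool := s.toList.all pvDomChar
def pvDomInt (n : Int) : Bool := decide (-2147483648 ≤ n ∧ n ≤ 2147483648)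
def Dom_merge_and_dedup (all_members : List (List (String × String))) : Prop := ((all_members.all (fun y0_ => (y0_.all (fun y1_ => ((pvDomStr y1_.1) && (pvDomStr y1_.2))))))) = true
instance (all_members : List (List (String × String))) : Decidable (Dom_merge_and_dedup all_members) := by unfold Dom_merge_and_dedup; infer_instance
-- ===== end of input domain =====

-- B changes the decomposition: one grouping pass (user_id → list of members), then a per-group
-- reduction of the source strings written once into a copy of the first member; same cost, no speed claim.

-- ===== PORT A =====
-- A's loop body as a named helper (the fold function of the single incremental pass).
def pvAStep (unique : PySem.Dict String (PySem.Dict String String)) (m : List (String × String)) :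
    PySem.Dict String (PySem.Dict String String) :=
  let uid := (PySem.Dict.mk m).getD "user_id" ""
  if uid = "" then unique
  else if unique.contains uid then
    let existing_sources := (unique.getD uid PySem.Dict.empty).getD "source_group" ""
    let new_source := (PySem.Dict.mk m).getD "source_group" ""
    if new_source ≠ "" ∧ ¬ (PySem.Str.isIn new_source existing_sources) then
      unique.insert uid ((unique.getD uid PySem.Dict.empty).insert "source_group"
        (if existing_sources ≠ "" then existing_sources ++ "; " ++ new_source else new_source))
    else unique
  else unique.insert uid (PySem.Dict.mk m)

def merge_and_dedup (all_members : List (List (String × String))) : List (List (String × String)) :=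
  ((all_members.foldl pvAStep (PySem.Dict.empty)).values).map PySem.Dict.items

-- ===== PORT B =====
-- B-side helpers: grouping step (setdefault(uid, []).append(m)) and the per-group source reduction.
def pvBGroupStep (groups : PySem.Dict String (List (List (String × String)))) (m : List (String × String)) :
    PySem.Dict String (List (List (String × String))) :=
  let uid := (PySem.Dict.mk m).getD "user_id" ""
  if uid = "" then groups
  else groups.modify uid [] (fun ms => ms ++ [m])   -- setdefault + in-place append

def pvMergeSrc (src : String) (m : List (String × String)) : String :=
  let s := (PySem.Dict.mk m).getD "source_group" ""
  if s ≠ "" ∧ ¬ (PySem.Str.isIn s src) then (if src ≠ "" then src ++ "; " ++ s else s) else src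

def pvMergeGroup (ms : List (List (String × String))) : List (String × String) :=
  match ms with
  | [] => []
  | first :: rest =>
    let src := rest.foldl pvMergeSrc ((PySem.Dict.mk first).getD "source_group" "")
    if src ≠ "" then ((PySem.Dict.mk first).insert "source_group" src).items else first

def merge_and_dedup_alt (all_members : List (List (String × String))) : List (List (String × String)) :=
  let groups := all_members.foldl pvBGroupStep
    (PySem.Dict.empty : PySem.Dict String (List (List (String × String))))
  groups.values.map pvMergeGroup

-- ===== PRECONDITION & SPEC =====
-- A's members are Python dicts; Pre_ restricts each inner association list to distinct keys,
-- exactly the lists that represent a Python dict (a duplicate-key list corresponds to no dict input).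
def Pre_merge_and_dedup (all_members : List (List (String × String))) : Prop :=
  (all_members.all (fun m => (m.map Prod.fst).Nodup)) = true
instance (all_members : List (List (String × String))) : Decidable (Pre_merge_and_dedup all_members) := by
  unfold Pre_merge_and_dedup; infer_instance

def pvWitness_merge_and_dedup : (List (List (String × String))) :=
  [[("user_id", "u1"), ("source_group", "g1")],
   [("user_id", "u1"), ("source_group", "g2")],
   [("user_id", "u2"), ("name", "bob")]]

def Spec_merge_and_dedup (all_members : List (List (String × String))) (out : List (List (String × String))) : Prop :=
  out = merge_and_dedup_alt all_members
instance (all_members : List (List (String × String))) (out : List (List (String × String))) : Decidable (Spec_merge_and_dedup all_members out) := by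
  unfold Spec_merge_and_dedup; infer_instance

-- ===== CLAIM (what is proved, stated in full; the proofs are below) =====
def Claim_equal_merge_and_dedup : Prop := ∀ (all_members : List (List (String × String))), Dom_merge_and_dedup all_members → Pre_merge_and_dedup all_members → Spec_merge_and_dedup all_members (merge_and_dedup all_members)

-- ===== LEMMAS AND PROOFS =====

-- The value A keeps for a user is B's reduction of the group collected so far.
def pvGroupD (ms : List (List (String × String))) : PySem.Dict String String :=
  PySem.Dict.mk (pvMergeGroup ms)

def pvSrcOf (ms : List (List (String × String))) : String :=
  match ms with
  | [] => ""
  | first :: rest => rest.foldl pvMergeSrc ((PySem.Dict.mk first).getD "source_group" "")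

def pvMapVals (g : PySem.Dict String (List (List (String × String)))) :
    PySem.Dict String (PySem.Dict String String) :=
  PySem.Dict.mk (g.items.map (fun p => (p.1, pvGroupD p.2)))

lemma pv_append_ne (a b c : String) (h : c ≠ "") : a ++ b ++ c ≠ "" := by
  intro he
  apply h
  have := congrArg String.toList he
  simp [String.toList_append] at this
  exact String.ext (by simp [this.2.2])

lemma pvMergeSrc_ne (src : String) (m : List (String × String)) (h : src ≠ "") :
    pvMergeSrc src m ≠ "" := by
  simp only [pvMergeSrc]
  split
  next hc => exact pv_append_ne _ _ _ hc.1
  next => exact h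

lemma pv_foldl_mergeSrc_ne (l : List (List (String × String))) (src : String) (h : src ≠ "") :
    l.foldl pvMergeSrc src ≠ "" := by
  induction l generalizing src with
  | nil => exact h
  | cons m rest ih => exact ih _ (pvMergeSrc_ne _ _ h)

lemma pv_getD_ne_contains {ν : Type} (d : PySem.Dict String ν) (k : String) (dflt : ν)
    (h : d.getD k dflt ≠ dflt) : d.contains k = true := by
  by_cases hc : d.contains k = true
  · exact hc
  · exact absurd (PySem.Dict.getD_of_not_contains d dflt (by simpa using hc)) h

lemma pv_insert_getD_self {ν : Type} (d : PySem.Dict String ν) (k : String) (dflt : ν)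
    (hk : d.keys.Nodup) (hc : d.contains k = true) : d.insert k (d.getD k dflt) = d := by
  apply PySem.Dict.ext
  rw [PySem.Dict.items_insert_of_contains _ _ hc]
  conv_rhs => rw [show d.items = d.items.map id from (List.map_id _).symm]
  apply List.map_congr_left
  intro p hp
  by_cases hb : (p.1 == k) = true
  · obtain ⟨p1, p2⟩ := p
    have hpk : p1 = k := by simpa using hb
    subst hpk
    have hq : d.get? p1 = some p2 := PySem.Dict.get?_of_mem_items _ hp hk
    have hd : d.getD p1 dflt = p2 := by rw [PySem.Dict.getD_eq_get?_getD, hq]; rfl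
    simp [hd]
  · simp [hb]

lemma pvGroupD_getD (ms : List (List (String × String))) (h : ms ≠ []) :
    (pvGroupD ms).getD "source_group" "" = pvSrcOf ms := by
  cases ms with
  | nil => exact absurd rfl h
  | cons first rest =>
    simp only [pvGroupD, pvSrcOf, pvMergeGroup]
    split
    next hs => exact PySem.Dict.getD_insert_self ..
    next hs =>
      have h0 : rest.foldl pvMergeSrc ((PySem.Dict.mk first).getD "source_group" "") = "" := by
        simpa using hs
      rw [h0]
      by_contra hne
      exact (pv_foldl_mergeSrc_ne rest _ hne) h0

lemma pvGroupD_single (m : List (String × String)) (hm : (m.map Prod.fst).Nodup) :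
    pvGroupD [m] = PySem.Dict.mk m := by
  simp only [pvGroupD, pvMergeGroup, List.foldl_nil]
  split
  next hs =>
    have hc : (PySem.Dict.mk m).contains "source_group" = true := pv_getD_ne_contains _ _ _ hs
    have hk : (PySem.Dict.mk m).keys.Nodup := by simpa [PySem.Dict.keys] using hm
    exact pv_insert_getD_self (PySem.Dict.mk m) "source_group" "" hk hc
  next => rfl

lemma pvGroupD_append (ms : List (List (String × String))) (m : List (String × String)) (h : ms ≠ []) :
    pvGroupD (ms ++ [m]) =
      (if ((PySem.Dict.mk m).getD "source_group" "") ≠ "" ∧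
          ¬ (PySem.Str.isIn ((PySem.Dict.mk m).getD "source_group" "") (pvSrcOf ms)) then
        (pvGroupD ms).insert "source_group"
          (if (pvSrcOf ms) ≠ "" then (pvSrcOf ms) ++ "; " ++ ((PySem.Dict.mk m).getD "source_group" "")
           else ((PySem.Dict.mk m).getD "source_group" ""))
      else pvGroupD ms) := by
  cases ms with
  | nil => exact absurd rfl h
  | cons first rest =>
    simp only [pvGroupD, pvMergeGroup, pvSrcOf, List.cons_append, List.foldl_append,
      List.foldl_cons, List.foldl_nil]
    set S := List.foldl pvMergeSrc ((PySem.Dict.mk first).getD "source_group" "") rest with hS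
    set sm := (PySem.Dict.mk m).getD "source_group" "" with hsm
    by_cases hc : sm ≠ "" ∧ ¬ PySem.Str.isIn sm S = true
    · rw [if_pos hc]
      have hstep : pvMergeSrc S m = if S ≠ "" then S ++ "; " ++ sm else sm := by
        simp only [pvMergeSrc, ← hsm]
        rw [if_pos hc]
      rw [hstep]
      by_cases hSne : S ≠ ""
      · have hcomb : (if S ≠ "" then S ++ "; " ++ sm else sm) ≠ "" := by
          rw [if_pos hSne]; exact pv_append_ne _ _ _ hc.1
        rw [if_pos hcomb, if_pos hSne, if_pos hSne]
        exact (PySem.Dict.insert_insert_self (PySem.Dict.mk first) "source_group" S _).symm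
      · have hcomb : (if S ≠ "" then S ++ "; " ++ sm else sm) ≠ "" := by
          rw [if_neg hSne]; exact hc.1
        rw [if_pos hcomb, if_neg hSne, if_neg hSne]
    · rw [if_neg hc]
      have hstep : pvMergeSrc S m = S := by
        simp only [pvMergeSrc, ← hsm]
        rw [if_neg hc]
      rw [hstep]

lemma pvMapVals_keys (g : PySem.Dict String (List (List (String × String)))) :
    (pvMapVals g).keys = g.keys := by
  simp [pvMapVals, PySem.Dict.keys]

lemma pvMapVals_contains (g : PySem.Dict String (List (List (String × String)))) (k : String) :
    (pvMapVals g).contains k = g.contains k := by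
  simp [pvMapVals, PySem.Dict.contains, List.any_map, Function.comp_def]

lemma pvMapVals_get? (g : PySem.Dict String (List (List (String × String)))) (k : String) :
    (pvMapVals g).get? k = (g.get? k).map pvGroupD := by
  simp [pvMapVals, PySem.Dict.get?, List.find?_map, Function.comp_def, Option.map_map]

lemma pvMapVals_insert (g : PySem.Dict String (List (List (String × String)))) (k : String)
    (v : List (List (String × String))) :
    pvMapVals (g.insert k v) = (pvMapVals g).insert k (pvGroupD v) := by
  apply PySem.Dict.ext
  simp only [PySem.Dict.insert, pvMapVals]
  rw [show (PySem.Dict.mk (List.map (fun p => (p.1, pvGroupD p.2)) g.items)).contains k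
        = g.contains k from pvMapVals_contains g k]
  by_cases hc : g.contains k = true
  · simp only [hc, if_pos, List.map_map]
    apply List.map_congr_left
    intro p hp
    by_cases hb : (p.1 == k) = true
    · have h' : p.1 = k := by simpa using hb
      simp [h']
    · have h' : ¬ p.1 = k := by simpa using hb
      simp [h']
  · simp [hc]

lemma pvStep_comm (g : PySem.Dict String (List (List (String × String)))) (m : List (String × String))
    (hk : g.keys.Nodup) (hne : ∀ p ∈ g.items, p.2 ≠ []) (hm : (m.map Prod.fst).Nodup) :
    pvAStep (pvMapVals g) m = pvMapVals (pvBGroupStep g m) := by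
  simp only [pvAStep, pvBGroupStep]
  by_cases hu : (PySem.Dict.mk m).getD "user_id" "" = ""
  · rw [if_pos hu, if_pos hu]
  · rw [if_neg hu, if_neg hu, pvMapVals_contains]
    by_cases hc : g.contains ((PySem.Dict.mk m).getD "user_id" "") = true
    · obtain ⟨ms, hms⟩ : ∃ ms, g.get? ((PySem.Dict.mk m).getD "user_id" "") = some ms := by
        rw [PySem.Dict.contains_eq_isSome_get?] at hc
        exact Option.isSome_iff_exists.1 hc
      have hmem : ((PySem.Dict.mk m).getD "user_id" "", ms) ∈ g.items :=
        PySem.Dict.mem_items_of_get?_eq_some _ hms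
      have hmsne : ms ≠ [] := hne _ hmem
      have hgd : g.getD ((PySem.Dict.mk m).getD "user_id" "") [] = ms := by
        rw [PySem.Dict.getD_eq_get?_getD, hms]; rfl
      have hget2 : (pvMapVals g).getD ((PySem.Dict.mk m).getD "user_id" "") PySem.Dict.empty
          = pvGroupD ms := by
        rw [PySem.Dict.getD_eq_get?_getD, pvMapVals_get?, hms]; rfl
      rw [if_pos hc, hget2, pvGroupD_getD ms hmsne]
      simp only [PySem.Dict.modify]
      rw [hgd, pvMapVals_insert, pvGroupD_append ms m hmsne]
      by_cases hcond : ((PySem.Dict.mk m).getD "source_group" "") ≠ "" ∧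
          ¬ (PySem.Str.isIn ((PySem.Dict.mk m).getD "source_group" "") (pvSrcOf ms)) = true
      · rw [if_pos hcond, if_pos hcond]
      · rw [if_neg hcond, if_neg hcond]
        have hk' : (pvMapVals g).keys.Nodup := by rw [pvMapVals_keys]; exact hk
        have hc' : (pvMapVals g).contains ((PySem.Dict.mk m).getD "user_id" "") = true := by
          rw [pvMapVals_contains]; exact hc
        conv_rhs => rw [← hget2]
        exact (pv_insert_getD_self _ _ _ hk' hc').symm
    · rw [if_neg hc]
      simp only [PySem.Dict.modify]
      rw [PySem.Dict.getD_of_not_contains g [] (by simpa using hc), List.nil_append,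
        pvMapVals_insert, pvGroupD_single m hm]

lemma pvMain (xs : List (List (String × String))) (g : PySem.Dict String (List (List (String × String))))
    (hk : g.keys.Nodup) (hne : ∀ p ∈ g.items, p.2 ≠ [])
    (hxs : ∀ m ∈ xs, (m.map Prod.fst).Nodup) :
    xs.foldl pvAStep (pvMapVals g) = pvMapVals (xs.foldl pvBGroupStep g) := by
  induction xs generalizing g with
  | nil => rfl
  | cons m rest ih =>
    rw [List.foldl_cons, List.foldl_cons,
      pvStep_comm g m hk hne (hxs m (List.mem_cons_self ..))]
    apply ih
    · simp only [pvBGroupStep]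
      split
      · exact hk
      · simp only [PySem.Dict.modify]
        exact PySem.Dict.nodup_keys_insert _ _ _ hk
    · simp only [pvBGroupStep]
      split
      · exact hne
      · simp only [PySem.Dict.modify]
        intro p hp
        rcases (PySem.Dict.mem_items_insert _ _ _ _).1 hp with h | h
        · rw [h]; simp
        · exact hne _ h.1
    · exact fun x hx => hxs x (List.mem_cons_of_mem _ hx)

-- ===== VERDICT (by name: the statement is the Claim_ definition above) =====
theorem merge_and_dedup_spec : Claim_equal_merge_and_dedup := by
  intro all_members hdom hpre
  unfold Spec_merge_and_dedup merge_and_dedup merge_and_dedup_alt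
  have hxs : ∀ m ∈ all_members, (m.map Prod.fst).Nodup := by
    intro m hm
    simp only [Pre_merge_and_dedup, List.all_eq_true] at hpre
    simpa using hpre m hm
  have h0 : (PySem.Dict.empty : PySem.Dict String (PySem.Dict String String))
      = pvMapVals PySem.Dict.empty := rfl
  rw [h0, pvMain all_members PySem.Dict.empty (by simp [PySem.Dict.empty]) (by intro p hp; simp [PySem.Dict.empty] at hp) hxs]
  simp [pvMapVals, PySem.Dict.values, List.map_map, Function.comp_def, pvGroupD]
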